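-- pv_equiv track=rewrite | github.com/predicateacademy/physical-computing | lightshow/lightshow_patterns.py | clear_right
-- ===== SOURCE A (Python) =====
-- def off(led):
-- 	patterns = []
-- 	pattern = ''
-- 	for x in range(len(led)):
-- 		pattern += '0'
-- 	patterns.append(pattern)
-- 	return patterns
--
-- def on(led):
-- 	patterns = []
-- 	pattern = ''
-- 	for x in range(len(led)):
-- 		pattern += '1'
-- 	patterns.append(pattern)
-- 	return patterns
--
-- def clear_right(led):
--    patterns = []
--    for x in range(len(led)):
--       l = on(led)
--       for item in l:
--          for idx in range(x):
--             tlist = list(item)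
--             tlist[len(tlist)-idx-1] = '0'
--             item = ''.join(tlist)
--          patterns.append(item)
--    patterns.extend(off(led))
--    return patterns
-- ===== SOURCE B (Python) =====
-- def clear_right(led):
--     n = len(led)
--     base = '1' * n + '0' * n
--     return [base[x:x + n] for x in range(n + 1)]
-- ===== Notes on version B (the rewrite author's own statement) =====
-- stated objective: faster
-- what changed: A rebuilds each pattern by mutating characters one at a time inside three nested loops (cubic in len(led)); B builds one master string '1'*n+'0'*n once and returns its n+1 sliding windows of width n, with no per-character mutation.
import Mathlib
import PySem

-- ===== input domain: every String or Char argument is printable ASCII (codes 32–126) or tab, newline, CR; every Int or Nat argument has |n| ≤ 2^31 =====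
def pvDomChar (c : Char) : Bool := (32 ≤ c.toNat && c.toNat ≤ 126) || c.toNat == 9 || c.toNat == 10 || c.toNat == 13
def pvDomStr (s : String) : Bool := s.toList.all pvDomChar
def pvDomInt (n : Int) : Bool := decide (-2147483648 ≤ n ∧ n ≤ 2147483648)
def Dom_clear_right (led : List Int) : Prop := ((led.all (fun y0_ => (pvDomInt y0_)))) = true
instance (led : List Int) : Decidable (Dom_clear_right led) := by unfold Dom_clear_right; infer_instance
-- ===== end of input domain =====

-- B replaces A's triple loop of per-character mutation by one master string '1'*n+'0'*n sliced into n+1 windows (objective: faster).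

-- ===== PORT A =====
-- string concatenation/join/list() ported over List Char with String.ofList/.toList (exact);
-- the index len(tlist)-idx-1 is always in range, so pySetD is exact here
def pvOff (led : List Int) : List String :=
  let pattern : List Char :=
    (PySem.List.pyRange 0 (led.length : Int) 1).foldl (fun p _ => p ++ ['0']) []
  [String.ofList pattern]

def pvOn (led : List Int) : List String :=
  let pattern : List Char :=
    (PySem.List.pyRange 0 (led.length : Int) 1).foldl (fun p _ => p ++ ['1']) []
  [String.ofList pattern]

def clear_right (led : List Int) : List String :=
  let patterns : List String :=
    (PySem.List.pyRange 0 (led.length : Int) 1).foldl (fun patterns x =>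
      let l := pvOn led
      l.foldl (fun patterns item =>
        let item := (PySem.List.pyRange 0 x 1).foldl (fun item idx =>
          let tlist := item.toList
          let tlist := PySem.List.pySetD tlist ((tlist.length : Int) - idx - 1) '0'
          String.ofList tlist) item
        patterns ++ [item]) patterns) []
  patterns ++ pvOff led

-- ===== PORT B =====
-- '1'*n is List.replicate n '1' (exact); base[x:x+n] is PySem.Str.slice
def clear_right_alt (led : List Int) : List String :=
  let n : Int := (led.length : Int)
  let base : String :=
    String.ofList (List.replicate led.length '1' ++ List.replicate led.length '0')
  (PySem.List.pyRange 0 (n + 1) 1).map (fun x => PySem.Str.slice base (some x) (some (x + n)))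

-- ===== PRECONDITION & SPEC =====
def Spec_clear_right (led : List Int) (out : List String) : Prop := out = clear_right_alt led
instance (led : List Int) (out : List String) : Decidable (Spec_clear_right led out) := by unfold Spec_clear_right; infer_instance

-- ===== CLAIM (what is proved, stated in full; the proofs are below) =====
def Claim_equal_clear_right : Prop := ∀ (led : List Int), Dom_clear_right led → Spec_clear_right led (clear_right led)

-- ===== LEMMAS AND PROOFS =====

theorem pv_flatMap_singleton {A B : Type} (f : A → B) (l : List A) :
    [] ++ l.flatMap (fun x => [f x]) = l.map f := by
  induction l <;> simp_all

-- the k-th pattern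
def pvPat (n k : Nat) : String :=
  String.ofList (List.replicate (n - k) '1' ++ List.replicate k '0')

theorem pv_window (n k : Nat) (hk : k ≤ n) :
    ((List.replicate n '1' ++ List.replicate n '0').drop k).take n
      = List.replicate (n - k) '1' ++ List.replicate k '0' := by
  rw [List.drop_append_of_le_length (by simpa using hk), List.drop_replicate, List.take_append,
    List.take_replicate, List.take_replicate, List.length_replicate]
  congr 2 <;> omega

theorem pv_alt_eq (led : List Int) :
    clear_right_alt led = (List.range (led.length + 1)).map (pvPat led.length) := by
  unfold clear_right_alt
  dsimp only
  have : ((led.length : Int) + 1) = ((led.length + 1 : Nat) : Int) := by push_cast; ring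
  rw [this, PySem.List.pyRange_zero_natCast, List.map_map]
  refine List.map_congr_left (fun k hk => ?_)
  have hk' : k ≤ led.length := by
    simp [List.mem_range] at hk; omega
  simp only [Function.comp, PySem.Str.slice, PySem.Chars.slice]
  have hadd : ((k : Int) + (led.length : Int)) = (((k + led.length : Nat)) : Int) := by push_cast; ring
  rw [String.toList_ofList, hadd, PySem.List.slice_natCast]
  have : k + led.length - k = led.length := by omega
  rw [this, pv_window _ _ hk']
  rfl

theorem pv_on_list (n : Nat) :
    (PySem.List.pyRange 0 (n : Int) 1).foldl (fun p (_ : Int) => p ++ [c]) []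
      = List.replicate n c := by
  rw [PySem.List.pyRange_zero_natCast]
  induction n with
  | zero => simp
  | succ m ih =>
    rw [List.range_succ, List.map_append, List.foldl_append, ih]
    simp [List.replicate_succ']

theorem pv_set_last (p : Nat) :
    (List.replicate (p + 1) '1').set p '0' = List.replicate p '1' ++ ['0'] := by
  rw [List.replicate_succ', List.set_append]
  simp

theorem pv_inner (n x : Nat) (hx : x ≤ n) :
    (PySem.List.pyRange 0 (x : Int) 1).foldl (fun item idx =>
        String.ofList (PySem.List.pySetD item.toList ((item.toList.length : Int) - idx - 1) '0'))
      (pvPat n 0) = pvPat n x := by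
  induction x with
  | zero => simp [PySem.List.pyRange]
  | succ m ih =>
    have hm : m ≤ n := by omega
    have : ((m : Int) + 1) = (((m + 1 : Nat)) : Int) := by push_cast; ring
    rw [show ((m + 1 : Nat) : Int) = (m : Int) + 1 by push_cast; ring,
      PySem.List.pyRange_one_succ_right (by positivity), List.foldl_append, ih hm]
    simp only [List.foldl_cons, List.foldl_nil, pvPat, String.toList_ofList]
    have hlen : (List.replicate (n - m) '1' ++ List.replicate m '0').length = n := by
      simp; omega
    rw [hlen]
    have hidx : ((n : Int) - (m : Int) - 1) = (((n - m - 1 : Nat)) : Int) := by push_cast [Nat.sub_sub]; omega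
    rw [hidx, PySem.List.pySetD_natCast, List.set_append]
    have h1 : n - m - 1 < (List.replicate (n - m) '1').length := by simp; omega
    obtain ⟨p, hp⟩ : ∃ p, n - m = p + 1 := ⟨n - m - 1, by omega⟩
    rw [if_pos h1, show n - m - 1 = p from by omega, hp, pv_set_last]
    have hp2 : n - (m + 1) = p := by omega
    rw [hp2, List.append_assoc]
    have : '0' :: List.replicate m '0' = List.replicate (m+1) '0' := by simp [List.replicate_succ]
    exact congrArg _ (congrArg _ this)

theorem pv_a_eq (led : List Int) :
    clear_right led = (List.range (led.length + 1)).map (pvPat led.length) := by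
  unfold clear_right pvOn pvOff
  rw [pv_on_list, pv_on_list, PySem.List.pyRange_zero_natCast, List.foldl_map]
  have hstep : ∀ (acc : List String) (k : Nat), k ∈ List.range led.length →
      (fun (patterns : List String) (x : Int) =>
        [String.ofList (List.replicate led.length '1')].foldl (fun patterns item =>
          patterns ++ [(PySem.List.pyRange 0 x 1).foldl (fun item idx =>
            String.ofList (PySem.List.pySetD item.toList ((item.toList.length : Int) - idx - 1) '0')) item]) patterns)
        acc (k : Nat) = acc ++ [pvPat led.length k] := by
    intro acc k hk
    have hk' : k ≤ led.length := by simp [List.mem_range] at hk; omega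
    simp only [List.foldl_cons, List.foldl_nil]
    congr 1
    have h0 : pvPat led.length 0 = String.ofList (List.replicate led.length '1') := by
      simp [pvPat]
    rw [← h0, pv_inner led.length k hk']
  rw [PySem.List.foldl_congr_mem _ _ _ _ (fun acc k hk => hstep acc k hk)]
  rw [List.range_succ, List.map_append,
    PySem.List.foldl_append_eq_flatMap (fun k => [pvPat led.length k])]
  refine congrArg₂ _ ?_ ?_
  · exact List.nil_append _ ▸ pv_flatMap_singleton _ _
  · simp [pvPat]

-- ===== VERDICT (by name: the statement is the Claim_ definition above) =====
theorem clear_right_spec : Claim_equal_clear_right := by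
  intro led _
  unfold Spec_clear_right
  rw [pv_a_eq, pv_alt_eq]
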